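-- pv_equiv track=rewrite | github.com/samyak3009/erp_backend | StudentMMS/constants_functions/Checks.py | Comma_function
-- ===== SOURCE A (Python) =====
-- def Comma_function(number):
-- 	number = str(number)
-- 	number_len = len(number)
-- 	if len(number) > 3:
-- 		number = number[:number_len - 3] + "," + number[-3:]
--
-- 	if len(number) > 6:
-- 		temp_data = ""
-- 		for index, x in enumerate(number[:-4][::-1]):
-- 			temp_data = temp_data + x
-- 			if index % 2 == 1:
-- 				temp_data = temp_data + ","
--
-- 		number = temp_data[::-1] + number[-4:]
-- 	if number[0] is ",":
-- 		number = number[1:]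
-- 	return number
-- ===== SOURCE B (Python) =====
-- def Comma_function(number):
--     # Indian-style comma grouping: one right-to-left chunking pass over the
--     # reversed string (first group of 3, then groups of 2), joined and reversed.
--     r = str(number)[::-1]
--     groups = [r[:3]]
--     i = 3
--     while i < len(r):
--         groups.append(r[i:i + 2])
--         i += 2
--     return ",".join(groups)[::-1]
-- ===== Notes on version B (the rewrite author's own statement) =====
-- stated objective: simpler
-- what changed: Replaces A's two-stage rewriting (splice a comma before the last three characters, then an enumerate/modulo character loop over part of the string plus a leading-comma strip) by one uniform right-to-left chunking pass: reverse str(number), take one group of three then groups of two, join with ',' and reverse.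
import Mathlib
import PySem

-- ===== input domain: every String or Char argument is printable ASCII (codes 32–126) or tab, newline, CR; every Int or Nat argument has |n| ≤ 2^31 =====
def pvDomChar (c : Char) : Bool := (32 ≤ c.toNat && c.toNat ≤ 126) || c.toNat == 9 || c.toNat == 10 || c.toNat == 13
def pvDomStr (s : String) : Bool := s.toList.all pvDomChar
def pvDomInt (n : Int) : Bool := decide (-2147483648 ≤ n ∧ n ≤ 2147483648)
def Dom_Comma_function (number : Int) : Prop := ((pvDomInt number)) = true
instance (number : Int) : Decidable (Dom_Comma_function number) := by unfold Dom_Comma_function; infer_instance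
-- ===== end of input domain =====

-- B replaces A's two-stage comma splicing (last-3 splice, then an enumerate/modulo
-- loop plus a leading-comma strip) by one uniform right-to-left chunking pass
-- (one group of three then groups of two over the reversed digit string), joined and reversed.
-- Strings are ported on their code-point lists (List Char); Python's s[::-1] is
-- List.reverse (exact: PySem.List.slice?_none_none_neg_one).

-- ===== PORT A =====
-- the 'for index, x in enumerate(...)' loop building temp_data
def pvAloop (cs : List Char) : List Char :=
  (PySem.List.enumerate cs 0).foldl
    (fun temp_data ix =>
      let temp_data := temp_data ++ [ix.2]
      if PySem.Int.mod ix.1 2 == 1 then temp_data ++ [','] else temp_data) []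

def pvAbody (number : List Char) : List Char :=
  let number_len : Int := number.length
  let number :=
    if (number.length : Int) > 3 then
      PySem.List.slice number none (some (number_len - 3)) ++ [','] ++
        PySem.List.slice number (some (-3)) none
    else number
  let number :=
    if (number.length : Int) > 6 then
      (pvAloop (PySem.List.slice number none (some (-4))).reverse).reverse ++
        PySem.List.slice number (some (-4)) none
    else number
  if PySem.List.pyGet? number 0 == some ',' then PySem.List.slice number (some 1) none
  else number

def Comma_function (number : Int) : String :=
  String.ofList (pvAbody (PySem.Int.toChars number))

-- ===== PORT B =====
-- the 'while i < len(r): groups.append(r[i:i+2]); i += 2' loop, as recursion on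
-- the part of r not yet grouped
def pvBchunks (r : List Char) : List (List Char) :=
  match r with
  | [] => []
  | [a] => [[a]]
  | a :: b :: rest => [a, b] :: pvBchunks rest

def Comma_function_alt (number : Int) : String :=
  let r := (PySem.Int.toChars number).reverse
  String.ofList (PySem.Chars.join [','] (r.take 3 :: pvBchunks (r.drop 3))).reverse

-- ===== PRECONDITION & SPEC =====
def Spec_Comma_function (number : Int) (out : String) : Prop := out = Comma_function_alt number
instance (number : Int) (out : String) : Decidable (Spec_Comma_function number out) := by unfold Spec_Comma_function; infer_instance

-- ===== CLAIM (what is proved, stated in full; the proofs are below) =====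
def Claim_equal_Comma_function : Prop := ∀ (number : Int), Dom_Comma_function number → Spec_Comma_function number (Comma_function number)

-- ===== LEMMAS AND PROOFS =====

-- proof-side decomposition of pvAbody
def pvStage1 (cs : List Char) : List Char :=
  if (cs.length : Int) > 3 then
    PySem.List.slice cs none (some ((cs.length : Int) - 3)) ++ [','] ++
      PySem.List.slice cs (some (-3)) none
  else cs

def pvStage2 (cs : List Char) : List Char :=
  if (cs.length : Int) > 6 then
    (pvAloop (PySem.List.slice cs none (some (-4))).reverse).reverse ++
      PySem.List.slice cs (some (-4)) none
  else cs

def pvStrip (cs : List Char) : List Char :=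
  if PySem.List.pyGet? cs 0 == some ',' then PySem.List.slice cs (some 1) none
  else cs

theorem pvAbody_eq (cs : List Char) : pvAbody cs = pvStrip (pvStage2 (pvStage1 cs)) := rfl

-- what A's enumerate loop computes: chars copied in order, ',' after each odd index
def pvGoA : List Char → List Char
  | [] => []
  | [a] => [a]
  | a :: b :: t => a :: b :: ',' :: pvGoA t

theorem pvAloop_aux (q : List Char) : ∀ (k : Int) (acc : List Char),
    (PySem.List.enumerate q (2 * k)).foldl
      (fun temp_data ix =>
        let temp_data := temp_data ++ [ix.2]
        if PySem.Int.mod ix.1 2 == 1 then temp_data ++ [','] else temp_data) acc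
    = acc ++ pvGoA q := by
  induction q using pvGoA.induct with
  | case1 => simp [pvGoA, PySem.List.enumerate]
  | case2 a =>
    intro k acc
    simp [PySem.List.enumerate, pvGoA]
  | case3 a b t ih =>
    intro k acc
    have h0 : PySem.Int.mod (2 * k) 2 = 0 := by
      rw [PySem.Int.mod_eq_emod_of_pos (by omega)]; omega
    have h1 : PySem.Int.mod (2 * k + 1) 2 = 1 := by
      rw [PySem.Int.mod_eq_emod_of_pos (by omega)]; omega
    have h2 : 2 * k + 1 + 1 = 2 * (k + 1) := by ring
    simp only [PySem.List.enumerate_cons, List.foldl_cons, h0, h1, h2, ih (k + 1)]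
    simp [pvGoA]

theorem pvAloop_eq (q : List Char) : pvAloop q = pvGoA q := by
  have h := pvAloop_aux q 0 []
  simpa [pvAloop] using h

theorem pvGoA_ne_nil {q : List Char} (h : q ≠ []) : pvGoA q ≠ [] := by
  match q with
  | [a] => simp [pvGoA]
  | a :: b :: t => simp [pvGoA]

theorem pvBchunks_ne_nil {q : List Char} (h : q ≠ []) : pvBchunks q ≠ [] := by
  match q with
  | [a] => simp [pvBchunks]
  | a :: b :: t => simp [pvBchunks]

theorem pvBchunks_short {q : List Char} (h : q ≠ []) (h2 : q.length ≤ 2) :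
    pvBchunks q = [q] := by
  match q with
  | [a] => rfl
  | [a, b] => rfl
  | a :: b :: c :: t => simp at h2

theorem pvStrip_cons (c : Char) (l : List Char) :
    pvStrip (c :: l) = if c = ',' then l else c :: l := by
  by_cases hc : c = ',' <;>
    simp [pvStrip, hc, PySem.List.pyGet?, PySem.List.pyIdx?, PySem.List.slice_from_one]

theorem pvStrip_append {l : List Char} (r : List Char) (h : l ≠ []) :
    pvStrip (l ++ r) = pvStrip l ++ r := by
  match l with
  | c :: l =>
    rw [List.cons_append, pvStrip_cons, pvStrip_cons]
    by_cases hc : c = ',' <;> simp [hc]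

theorem pvKey (q : List Char) (hne : q ≠ []) (hlast : q.getLast? ≠ some ',') :
    pvStrip ((pvGoA q).reverse) = (PySem.Chars.join [','] (pvBchunks q)).reverse := by
  induction q using pvGoA.induct with
  | case1 => exact absurd rfl hne
  | case2 a =>
    have ha : a ≠ ',' := by simpa using hlast
    simp [pvGoA, pvBchunks, pvStrip_cons, ha, PySem.Chars.join_singleton]
  | case3 a b t ih =>
    match t, ih with
    | [], _ =>
      simp [pvGoA, pvBchunks, PySem.Chars.join_singleton, pvStrip_cons]
    | c :: t', ih =>
      have htne : (c :: t') ≠ [] := by simp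
      have hlast' : (c :: t').getLast? ≠ some ',' := by
        simpa [List.getLast?_cons_cons] using hlast
      obtain ⟨g, gs, hgs⟩ := List.exists_cons_of_ne_nil (pvBchunks_ne_nil htne)
      have hrev : (pvGoA (a :: b :: c :: t')).reverse
          = (pvGoA (c :: t')).reverse ++ [',', b, a] := by
        show (a :: b :: ',' :: pvGoA (c :: t')).reverse = _
        simp
      rw [hrev, pvStrip_append _ (by simpa using pvGoA_ne_nil htne),
        ih htne hlast']
      show _ = (PySem.Chars.join [','] ([a, b] :: pvBchunks (c :: t'))).reverse
      rw [hgs, PySem.Chars.join_cons_cons]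
      simp

theorem pvDigitChar_ne_comma (d : Nat) : Nat.digitChar d ≠ ',' := by
  match d with
  | 0 | 1 | 2 | 3 | 4 | 5 | 6 | 7 | 8 | 9 | 10 | 11 | 12 | 13 | 14 | 15 => decide
  | d + 16 => simp [Nat.digitChar]

theorem pvToDigitsCore_ne_nil (b : Nat) : ∀ (fuel n : Nat) (acc : List Char),
    fuel ≠ 0 ∨ acc ≠ [] → Nat.toDigitsCore b fuel n acc ≠ [] := by
  intro fuel
  induction fuel with
  | zero => intro n acc h; simpa [Nat.toDigitsCore] using h.resolve_left (by simp)
  | succ f ih =>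
    intro n acc _
    rw [Nat.toDigitsCore]
    split
    · simp
    · exact ih _ _ (Or.inr (by simp))

theorem pvToDigitsCore_no_comma (b : Nat) : ∀ (fuel n : Nat) (acc : List Char),
    ',' ∉ acc → ',' ∉ Nat.toDigitsCore b fuel n acc := by
  intro fuel
  induction fuel with
  | zero => intro n acc h; simpa [Nat.toDigitsCore] using h
  | succ f ih =>
    intro n acc h
    rw [Nat.toDigitsCore]
    split
    · simp [h, Ne.symm (pvDigitChar_ne_comma _)]
    · exact ih _ _ (by simp [h, Ne.symm (pvDigitChar_ne_comma _)])

theorem pvToChars_ne_nil (n : Int) : PySem.Int.toChars n ≠ [] := by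
  unfold PySem.Int.toChars
  split
  · simp
  · exact pvToDigitsCore_ne_nil 10 _ _ [] (Or.inl (by simp))

theorem pvToChars_head (n : Int) : (PySem.Int.toChars n).head? ≠ some ',' := by
  unfold PySem.Int.toChars
  split
  · simp
  · intro h
    have hnc : ',' ∉ Nat.toDigits 10 n.toNat := by
      rw [Nat.toDigits]; exact pvToDigitsCore_no_comma 10 _ _ [] (by simp)
    cases hL : Nat.toDigits 10 n.toNat with
    | nil => rw [hL] at h; simp at h
    | cons c t =>
      rw [hL] at h hnc
      simp at h
      simp [h] at hnc

theorem pvMain (cs : List Char) (hne : cs ≠ []) (hhead : cs.head? ≠ some ',') :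
    pvStrip (pvStage2 (pvStage1 cs)) =
      (PySem.Chars.join [','] (cs.reverse.take 3 :: pvBchunks (cs.reverse.drop 3))).reverse := by
  by_cases h3 : cs.length ≤ 3
  · have hs1 : pvStage1 cs = cs := by
      unfold pvStage1; rw [if_neg (by omega)]
    have hs2 : pvStage2 cs = cs := by
      unfold pvStage2; rw [if_neg (by omega)]
    rw [hs1, hs2]
    obtain ⟨c, t, rfl⟩ := List.exists_cons_of_ne_nil hne
    have hc : c ≠ ',' := by simpa using hhead
    rw [pvStrip_cons, if_neg hc]
    have hdrop : (c :: t).reverse.drop 3 = [] := List.drop_eq_nil_of_le (by simpa using h3)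
    have htake : (c :: t).reverse.take 3 = (c :: t).reverse := List.take_of_length_le (by simpa using h3)
    rw [hdrop, htake]
    simp [pvBchunks, PySem.Chars.join_singleton]
  · obtain ⟨c, t, rfl⟩ := List.exists_cons_of_ne_nil hne
    have hc : c ≠ ',' := by simpa using hhead
    set cs := c :: t with hcs
    set m := cs.length - 3 with hm
    have hm1 : 1 ≤ m := by omega
    have hps : cs.take m ++ cs.drop m = cs := List.take_append_drop _ _
    have hpl : (cs.take m).length = m := by rw [List.length_take]; omega
    have hsl : (cs.drop m).length = 3 := by rw [List.length_drop]; omega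
    obtain ⟨m', hm'⟩ : ∃ m', m = m' + 1 := ⟨m - 1, by omega⟩
    have hphead : cs.take m = c :: t.take (m - 1) := by
      rw [hcs, hm']; simp
    have e1 : pvStage1 cs = cs.take m ++ [','] ++ cs.drop m := by
      unfold pvStage1
      rw [if_pos (by omega)]
      have hc1 : (cs.length : Int) - 3 = ((m : Nat) : Int) := by omega
      rw [hc1, PySem.List.slice_to_natCast,
        PySem.List.slice_from_neg_ofNat cs 3 (by omega)]
    have hrev : cs.reverse = (cs.drop m).reverse ++ (cs.take m).reverse := by
      conv_lhs => rw [← hps]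
      simp
    have ht3 : cs.reverse.take 3 = (cs.drop m).reverse := by
      rw [hrev, List.take_left' (by simp [hsl])]
    have hd3 : cs.reverse.drop 3 = (cs.take m).reverse := by
      rw [hrev, List.drop_left' (by simp [hsl])]
    rw [e1, ht3, hd3]
    by_cases h6 : m ≤ 2
    · have e2 : pvStage2 (cs.take m ++ [','] ++ cs.drop m) = cs.take m ++ [','] ++ cs.drop m := by
        unfold pvStage2
        rw [if_neg (by
          simp only [List.length_append, List.length_cons, List.length_nil, hpl, hsl]
          push_cast; omega)]
      rw [e2, hphead, List.cons_append, List.cons_append, pvStrip_cons, if_neg hc,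
        ← List.cons_append, ← List.cons_append, ← hphead]
      rw [pvBchunks_short (by simp [hphead]) (by simp [hpl]; omega),
        PySem.Chars.join_cons_cons, PySem.Chars.join_singleton]
      simp
    · have e2 : pvStage2 (cs.take m ++ [','] ++ cs.drop m)
          = (pvAloop (cs.take m).reverse).reverse ++ (',' :: cs.drop m) := by
        unfold pvStage2
        rw [if_pos (by
          simp only [List.length_append, List.length_cons, List.length_nil, hpl, hsl]
          push_cast; omega)]
        rw [PySem.List.slice_to_neg_ofNat _ 4 (by omega),
          PySem.List.slice_from_neg_ofNat _ 4 (by omega)]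
        have hlen4 : (cs.take m ++ [','] ++ cs.drop m).length - 4 = m := by
          simp only [List.length_append, List.length_cons, List.length_nil, hpl, hsl]
          omega
        rw [hlen4, List.append_assoc, List.singleton_append,
          List.take_left' hpl, List.drop_left' hpl]
      rw [e2, pvAloop_eq, pvStrip_append _ (by simpa using pvGoA_ne_nil (by simp [hphead]))]
      have hlastq : ((cs.take m).reverse).getLast? ≠ some ',' := by
        rw [List.getLast?_reverse, hphead]
        simpa using hc
      rw [pvKey _ (by simp [hphead]) hlastq]
      have hql : (cs.take m).reverse.length = m := by simp [hpl]
      obtain ⟨x, q1, hq1⟩ := List.exists_cons_of_ne_nil (by simp [hphead] :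
        ((cs.take m).reverse) ≠ [])
      obtain ⟨y, q2, hq2⟩ := List.exists_cons_of_ne_nil (by
        intro hq; rw [hq1, hq] at hql; simp at hql; omega : q1 ≠ [])
      have hq2ne : q2 ≠ [] := by
        intro hq; rw [hq1, hq2, hq] at hql; simp at hql; omega
      obtain ⟨g, gs, hgs⟩ := List.exists_cons_of_ne_nil (pvBchunks_ne_nil hq2ne)
      rw [hq1, hq2]
      show _ = (PySem.Chars.join [','] ((cs.drop m).reverse :: [x, y] :: pvBchunks q2)).reverse
      rw [PySem.Chars.join_cons_cons]
      have : pvBchunks (x :: y :: q2) = [x, y] :: pvBchunks q2 := rfl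
      rw [this]
      simp

-- ===== VERDICT (by name: the statement is the Claim_ definition above) =====
theorem Comma_function_spec : Claim_equal_Comma_function := by
  intro number _dom
  unfold Spec_Comma_function Comma_function Comma_function_alt
  rw [pvAbody_eq, pvMain _ (pvToChars_ne_nil number) (pvToChars_head number)]
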